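-- pv_equiv track=rewrite | github.com/DSM-UP/Study | 유시온/2019년/11월/22일/Chess2.py | table_color_set
-- ===== SOURCE A (Python) =====
-- def table_color_set(color):
--     x_index, y_index, indexes = [], [], []
--     if color != [[]] and color != []:
--         for i in color:
--             x_index.append(i[0])
--             y_index.append(i[1])
--
--     for i in range(0, int(len(x_index))):
--         indexes.append([x_index[i], y_index[i]])
--
--     return indexes
-- ===== SOURCE B (Python) =====
-- def table_color_set(color):
--     if color == [[]]:
--         return []
--     return [[i[0], i[1]] for i in color]
-- ===== Notes on version B (the rewrite author's own statement) =====
-- stated objective: simpler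
-- what changed: B builds each [x, y] pair directly in one pass over color instead of A's split into two parallel index lists followed by a second re-zipping loop over range(len).
import Mathlib
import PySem

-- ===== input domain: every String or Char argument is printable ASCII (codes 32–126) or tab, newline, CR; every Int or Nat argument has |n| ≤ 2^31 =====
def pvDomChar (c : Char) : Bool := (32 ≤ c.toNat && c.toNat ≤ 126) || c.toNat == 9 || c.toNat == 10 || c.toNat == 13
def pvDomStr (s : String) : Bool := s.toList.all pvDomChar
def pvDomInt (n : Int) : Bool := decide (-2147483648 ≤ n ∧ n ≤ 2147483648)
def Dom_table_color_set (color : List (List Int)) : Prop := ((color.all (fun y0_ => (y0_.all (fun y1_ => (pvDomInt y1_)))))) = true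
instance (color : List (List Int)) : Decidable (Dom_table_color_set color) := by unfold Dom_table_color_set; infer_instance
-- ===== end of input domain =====

-- B replaces A's two parallel index lists + re-zip loop by one direct pass; objective: simpler.

-- i[0] / i[1] on an admitted input (Pre_ guarantees the index is in range, where the default is never used)
def pvFst (i : List Int) : Int := (PySem.List.pyGet? i 0).getD 0
def pvSnd (i : List Int) : Int := (PySem.List.pyGet? i 1).getD 0

-- ===== PORT A =====
def table_color_set (color : List (List Int)) : List (List Int) :=
  let p : List Int × List Int :=
    if color ≠ [[]] ∧ color ≠ [] then
      color.foldl (fun (p : List Int × List Int) i => (p.1 ++ [pvFst i], p.2 ++ [pvSnd i])) ([], [])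
    else ([], [])
  (PySem.List.pyRange 0 (p.1.length : Int) 1).foldl
    (fun (indexes : List (List Int)) k =>
      indexes ++ [[(PySem.List.pyGet? p.1 k).getD 0, (PySem.List.pyGet? p.2 k).getD 0]]) []

-- ===== PORT B =====
def table_color_set_alt (color : List (List Int)) : List (List Int) :=
  if color = [[]] then []
  else color.map (fun i => [pvFst i, pvSnd i])

-- ===== PRECONDITION & SPEC =====
-- Pre_ excludes exactly the inputs on which Python A raises IndexError: some inner list shorter
-- than 2 (unless the whole input is the guarded [] or [[]], where A returns []).
def Pre_table_color_set (color : List (List Int)) : Prop :=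
  color = [[]] ∨ ∀ i ∈ color, 2 ≤ i.length
instance (color : List (List Int)) : Decidable (Pre_table_color_set color) := by
  unfold Pre_table_color_set; infer_instance

def pvWitness_table_color_set : List (List Int) := [[1, 2], [3, 4]]

def Spec_table_color_set (color : List (List Int)) (out : List (List Int)) : Prop := out = table_color_set_alt color
instance (color : List (List Int)) (out : List (List Int)) : Decidable (Spec_table_color_set color out) := by unfold Spec_table_color_set; infer_instance

-- ===== CLAIM (what is proved, stated in full; the proofs are below) =====
def Claim_equal_table_color_set : Prop := ∀ (color : List (List Int)), Dom_table_color_set color → Pre_table_color_set color → Spec_table_color_set color (table_color_set color)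

-- ===== LEMMAS AND PROOFS =====

-- A's first loop builds the two parallel projection lists.
theorem pv_fold1 (color : List (List Int)) (a b : List Int) :
    color.foldl (fun (p : List Int × List Int) i => (p.1 ++ [pvFst i], p.2 ++ [pvSnd i])) (a, b)
      = (a ++ color.map pvFst, b ++ color.map pvSnd) := by
  induction color generalizing a b with
  | nil => simp
  | cons x xs ih => simp [List.foldl_cons, ih]

-- appending fold = map over the iteration list
theorem pv_fold_append {α β : Type} (r : List α) (g : α → β) (init : List β) :
    r.foldl (fun acc k => acc ++ [g k]) init = init ++ r.map g := by
  induction r generalizing init with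
  | nil => simp
  | cons x xs ih => simp [List.foldl_cons, ih]

-- A's second loop re-zips the two parallel lists.
theorem pv_zip_loop (xs ys : List Int) :
    (PySem.List.pyRange 0 (xs.length : Int) 1).foldl
      (fun (indexes : List (List Int)) k =>
        indexes ++ [[(PySem.List.pyGet? xs k).getD 0, (PySem.List.pyGet? ys k).getD 0]]) []
    = (List.range xs.length).map
        (fun k => [xs.getD k 0, ys.getD k 0]) := by
  rw [pv_fold_append, PySem.List.pyRange_one, List.map_map]
  simp [Function.comp_def, PySem.List.pyGet?_natCast, List.getD]

theorem table_color_set_spec : Claim_equal_table_color_set := by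
  intro color _ _
  unfold Spec_table_color_set table_color_set table_color_set_alt
  by_cases h1 : color = [[]]
  · simp [h1, PySem.List.pyRange_one_eq_nil]
  · by_cases h2 : color = []
    · simp [h2, PySem.List.pyRange_one_eq_nil]
    · simp only [h1, h2, ne_eq, not_false_iff, and_self, if_true]
      rw [pv_fold1, List.nil_append, List.nil_append, pv_zip_loop]
      apply List.ext_getElem
      · simp
      · intro k hk hk'
        have hkc : k < color.length := by simpa using hk'
        simp [List.getElem?_eq_getElem hkc]

-- ===== VERDICT (by name: the statement is the Claim_ definition above) =====
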